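-- pv_equiv track=rewrite | github.com/iansedano/aoc | python/src/aoc/2023/14.py | spin
-- ===== SOURCE A (Python) =====
-- def spin(shape, balls, cubes):
--     # North
--     cols = [tilt_col(col) for col in get_cols(balls, cubes, shape)]
--     balls = get_ball_positions(cols, "y")
--     # West
--     rows = [tilt_col(row) for row in get_rows(balls, cubes, shape)]
--     balls = get_ball_positions(rows, "x")
--     # South
--     cols = [
--         tilt_col(col, shape[1], True) for col in get_cols(balls, cubes, shape)
--     ]
--     balls = get_ball_positions(cols, "y")
--     # East
--     rows = [
--         tilt_col(row, shape[0], True) for row in get_rows(balls, cubes, shape)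
--     ]
--     return get_ball_positions(rows, "x")
--
-- def get_ball_positions(arrays, axis):
--     balls = set()
--     for a, sub_array in enumerate(arrays):
--         for item in sub_array:
--             if item[0] == "O":
--                 if axis == "y":
--                     balls.add((a, item[1]))
--                 elif axis == "x":
--                     balls.add((item[1], a))
--     return balls
--
-- def get_cols(balls, cubes, shape):
--     cols = []
--     for x in range(shape[0]):
--         col = []
--         for y in range(shape[1]):
--             pos = (x, y)
--             if pos in balls:
--                 col.append(("O", y))
--             elif pos in cubes:
--                 col.append(("#", y))
--         cols.append(col)
--     return cols
--
-- def get_rows(balls, cubes, shape):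
--     rows = []
--     for y in range(shape[1]):
--         row = []
--         for x in range(shape[0]):
--             pos = (x, y)
--             if pos in balls:
--                 row.append(("O", x))
--             elif pos in cubes:
--                 row.append(("#", x))
--         rows.append(row)
--     return rows
--
-- def tilt_col(col, limit=0, reversed=False):
--     tilted_col = []
--
--     stacking_point = limit - 1 if not reversed else limit
--     col = sorted(col, key=lambda x: x[1], reverse=reversed)
--     for item in col:
--         if item[0] == "#":
--             tilted_col.append(item)
--             stacking_point = item[1]
--         if item[0] == "O":
--             stacking_point = (
--                 stacking_point + 1 if not reversed else stacking_point - 1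
--             )
--             tilted_col.append((item[0], stacking_point))
--
--     return tilted_col
-- ===== SOURCE B (Python) =====
-- def spin(shape, balls, cubes):
--     W, H = shape[0], shape[1]
--
--     def tilt(balls, vertical, forward):
--         new = set()
--         outer = range(W) if vertical else range(H)
--         n = H if vertical else W
--         inner = range(n) if forward else range(n - 1, -1, -1)
--         step = 1 if forward else -1
--         for a in outer:
--             stack = -1 if forward else n
--             for b in inner:
--                 pos = (a, b) if vertical else (b, a)
--                 if pos in balls:
--                     stack += step
--                     new.add((a, stack) if vertical else (stack, a))
--                 elif pos in cubes:
--                     stack = b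
--         return new
--
--     balls = tilt(balls, True, True)    # North
--     balls = tilt(balls, False, True)   # West
--     balls = tilt(balls, True, False)   # South
--     return tilt(balls, False, False)   # East
-- ===== Notes on version B (the rewrite author's own statement) =====
-- stated objective: alternative
-- what changed: B replaces each tilt's three passes (build tagged column/row lists over the grid, Python-sort each, tilt, then a separate extraction pass rebuilding the ball set) with a single direct scan per line that carries a stacking pointer and emits the new ball positions immediately, with no sorting and no intermediate tagged lists.
import Mathlib
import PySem

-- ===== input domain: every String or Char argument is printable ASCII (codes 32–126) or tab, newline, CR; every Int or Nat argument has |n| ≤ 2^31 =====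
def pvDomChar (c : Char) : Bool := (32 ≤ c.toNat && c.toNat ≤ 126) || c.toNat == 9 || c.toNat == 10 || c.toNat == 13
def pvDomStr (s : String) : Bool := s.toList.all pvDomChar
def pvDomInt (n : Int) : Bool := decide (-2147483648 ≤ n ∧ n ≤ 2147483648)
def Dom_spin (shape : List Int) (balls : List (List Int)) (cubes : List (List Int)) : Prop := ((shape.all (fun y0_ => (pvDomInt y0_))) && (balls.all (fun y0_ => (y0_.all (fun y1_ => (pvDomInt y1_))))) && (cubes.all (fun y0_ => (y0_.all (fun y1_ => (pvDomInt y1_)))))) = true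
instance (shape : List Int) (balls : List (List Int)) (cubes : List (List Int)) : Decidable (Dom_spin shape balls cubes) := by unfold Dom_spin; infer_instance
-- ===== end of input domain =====

-- B fuses each tilt into one direct grid scan (no sorting, no tagged column lists, no
-- separate position-extraction pass); equivalence is about the returned value (neither
-- program mutates its arguments).

-- ===== PORT A =====
-- get_ball_positions(arrays, axis); 'for a, sub_array in enumerate(arrays)' is ported as a
-- fold carrying the running index a alongside the set (Python's enumerate counter)
def getBallPositions (arrays : List (List (String × Int))) (axis : String) : List (List Int) :=
  (arrays.foldl (fun (st : List (List Int) × Int) subArray =>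
    (subArray.foldl (fun balls item =>
      if item.1 == "O" then
        if axis == "y" then PySem.Set.add balls [st.2, item.2]
        else if axis == "x" then PySem.Set.add balls [item.2, st.2]
        else balls
      else balls) st.1, st.2 + 1)) (PySem.Set.empty, 0)).1

-- get_cols(balls, cubes, shape)
def getCols (balls cubes : List (List Int)) (shape : List Int) : List (List (String × Int)) :=
  (PySem.List.pyRange 0 (PySem.List.pyGetD shape 0 0) 1).map (fun x =>
    (PySem.List.pyRange 0 (PySem.List.pyGetD shape 1 0) 1).foldl (fun col y =>
      if balls.contains [x, y] then col ++ [("O", y)]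
      else if cubes.contains [x, y] then col ++ [("#", y)]
      else col) [])

-- get_rows(balls, cubes, shape)
def getRows (balls cubes : List (List Int)) (shape : List Int) : List (List (String × Int)) :=
  (PySem.List.pyRange 0 (PySem.List.pyGetD shape 1 0) 1).map (fun y =>
    (PySem.List.pyRange 0 (PySem.List.pyGetD shape 0 0) 1).foldl (fun row x =>
      if balls.contains [x, y] then row ++ [("O", x)]
      else if cubes.contains [x, y] then row ++ [("#", x)]
      else row) [])

-- tilt_col(col, limit=0, reversed=False)
def tiltCol (col : List (String × Int)) (limit : Int) (rev : Bool) : List (String × Int) :=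
  let stackingPoint : Int := if !rev then limit - 1 else limit
  let col := PySem.List.sorted col (fun x => x.2) rev
  (col.foldl (fun (st : List (String × Int) × Int) item =>
    let st := if item.1 == "#" then (st.1 ++ [item], item.2) else st
    if item.1 == "O" then
      let sp := if !rev then st.2 + 1 else st.2 - 1
      (st.1 ++ [(item.1, sp)], sp)
    else st) ([], stackingPoint)).1

def spin (shape : List Int) (balls : List (List Int)) (cubes : List (List Int)) : List (List Int) :=
  -- North
  let cols := (getCols balls cubes shape).map (fun col => tiltCol col 0 false)
  let balls := getBallPositions cols "y"
  -- West
  let rows := (getRows balls cubes shape).map (fun row => tiltCol row 0 false)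
  let balls := getBallPositions rows "x"
  -- South
  let cols := (getCols balls cubes shape).map (fun col => tiltCol col (PySem.List.pyGetD shape 1 0) true)
  let balls := getBallPositions cols "y"
  -- East
  let rows := (getRows balls cubes shape).map (fun row => tiltCol row (PySem.List.pyGetD shape 0 0) true)
  getBallPositions rows "x"

-- ===== PORT B =====
-- tilt(balls, vertical, forward) of Source B (W, H closed over → explicit parameters)
def tiltB (W H : Int) (balls cubes : List (List Int)) (vertical forward : Bool) : List (List Int) :=
  let outer := if vertical then PySem.List.pyRange 0 W 1 else PySem.List.pyRange 0 H 1
  let n : Int := if vertical then H else W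
  let inner := if forward then PySem.List.pyRange 0 n 1 else PySem.List.pyRange (n - 1) (-1) (-1)
  let step : Int := if forward then 1 else -1
  outer.foldl (fun new a =>
    (inner.foldl (fun (st : PySem.Set (List Int) × Int) b =>
      if balls.contains (if vertical then [a, b] else [b, a]) then
        let stack := st.2 + step
        (PySem.Set.add st.1 (if vertical then [a, stack] else [stack, a]), stack)
      else if cubes.contains (if vertical then [a, b] else [b, a]) then (st.1, b)
      else st) (new, if forward then (-1 : Int) else n)).1) PySem.Set.empty

def spin_alt (shape : List Int) (balls : List (List Int)) (cubes : List (List Int)) : List (List Int) :=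
  let W := PySem.List.pyGetD shape 0 0
  let H := PySem.List.pyGetD shape 1 0
  let balls := tiltB W H balls cubes true true    -- North
  let balls := tiltB W H balls cubes false true   -- West
  let balls := tiltB W H balls cubes true false   -- South
  tiltB W H balls cubes false false               -- East

-- ===== PRECONDITION & SPEC =====
-- Pre_ excludes only the inputs on which the Python A raises: shape[0]/shape[1] is an
-- IndexError when shape has fewer than two entries.
def Pre_spin (shape : List Int) (balls : List (List Int)) (cubes : List (List Int)) : Prop := (match shape with | _ :: _ :: _ => true | _ => false) = true
instance (shape : List Int) (balls : List (List Int)) (cubes : List (List Int)) : Decidable (Pre_spin shape balls cubes) := by unfold Pre_spin; infer_instance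
def pvWitness_spin : List Int × List (List Int) × List (List Int) := ([3, 3], [[0, 0], [1, 2], [2, 2]], [[1, 1]])

def Spec_spin (shape : List Int) (balls : List (List Int)) (cubes : List (List Int)) (out : List (List Int)) : Prop := out = spin_alt shape balls cubes
instance (shape : List Int) (balls : List (List Int)) (cubes : List (List Int)) (out : List (List Int)) : Decidable (Spec_spin shape balls cubes out) := by unfold Spec_spin; infer_instance

-- ===== CLAIM (what is proved, stated in full; the proofs are below) =====
def Claim_equal_spin : Prop := ∀ (shape : List Int) (balls : List (List Int)) (cubes : List (List Int)), Dom_spin shape balls cubes → Pre_spin shape balls cubes → Spec_spin shape balls cubes (spin shape balls cubes)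

-- ===== LEMMAS AND PROOFS =====

def mkP : Bool → Int → Int → List Int
  | true, a, b => [a, b]
  | false, a, b => [b, a]

def objsOf (S C : List (List Int)) (v : Bool) (a : Int) (ys : List Int) : List (String × Int) :=
  ys.filterMap (fun y => if S.contains (mkP v a y) then some ("O", y) else if C.contains (mkP v a y) then some ("#", y) else none)

def tiltRun (rev : Bool) : List (String × Int) → Int → List (String × Int)
  | [], _ => []
  | item :: t, stack =>
    if item.1 == "#" then item :: tiltRun rev t item.2
    else if item.1 == "O" then ((item.1, if !rev then stack + 1 else stack - 1) :: tiltRun rev t (if !rev then stack + 1 else stack - 1))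
    else tiltRun rev t stack

def seqOf (S C : List (List Int)) (v : Bool) (step a : Int) : List Int → Int → List Int
  | [], _ => []
  | y :: t, stack =>
    if S.contains (mkP v a y) then (stack + step) :: seqOf S C v step a t (stack + step)
    else if C.contains (mkP v a y) then seqOf S C v step a t y
    else seqOf S C v step a t stack

theorem scan_eq (S C : List (List Int)) (v : Bool) (a : Int) : ∀ (ys : List Int) (acc : List (String × Int)),
    ys.foldl (fun col y => if S.contains (mkP v a y) then col ++ [("O", y)] else if C.contains (mkP v a y) then col ++ [("#", y)] else col) acc = acc ++ objsOf S C v a ys := by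
  intro ys
  induction ys with
  | nil => intro acc; simp [objsOf]
  | cons y t ih =>
    intro acc
    simp only [List.foldl_cons, objsOf, List.filterMap_cons]
    split_ifs with h1 h2 <;> rw [ih] <;> simp [objsOf]

theorem objs_pairwise (S C : List (List Int)) (v : Bool) (a : Int) (ys : List Int) (h : ys.Pairwise (· < ·)) :
    (objsOf S C v a ys).Pairwise (fun p q => p.2 < q.2) := by
  unfold objsOf
  refine List.Pairwise.filterMap _ (fun x y hxy => ?_) h
  intro p hp q hq
  split_ifs at hp hq <;> (cases hp; cases hq; exact hxy)

theorem sorted_objs_false (S C : List (List Int)) (v : Bool) (a : Int) (ys : List Int) (h : ys.Pairwise (· < ·)) :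
    PySem.List.sorted (objsOf S C v a ys) (fun x => x.2) false = objsOf S C v a ys := by
  apply PySem.List.sorted_eq_self_of_pairwise
  exact (objs_pairwise S C v a ys h).imp (fun h => le_of_lt h)

theorem sorted_objs_true (S C : List (List Int)) (v : Bool) (a : Int) (ys : List Int) (h : ys.Pairwise (· < ·)) :
    PySem.List.sorted (objsOf S C v a ys) (fun x => x.2) true = objsOf S C v a ys.reverse := by
  have h2 : (objsOf S C v a ys).reverse.Pairwise (fun p q => q.2 < p.2) := by
    rw [List.pairwise_reverse]; exact objs_pairwise S C v a ys h
  have := PySem.List.sorted_rev_eq_of_perm_of_pairwise_gt (xs := objsOf S C v a ys) (key := fun x => x.2)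
    (ys := (objsOf S C v a ys).reverse) (List.reverse_perm _) h2
  rw [this, objsOf, objsOf]
  exact List.filterMap_reverse.symm

theorem tilt_fold (rev : Bool) : ∀ (items : List (String × Int)) (acc : List (String × Int)) (stack : Int),
    (items.foldl (fun (st : List (String × Int) × Int) item =>
      let st := if item.1 == "#" then (st.1 ++ [item], item.2) else st
      if item.1 == "O" then
        (st.1 ++ [(item.1, if !rev then st.2 + 1 else st.2 - 1)], if !rev then st.2 + 1 else st.2 - 1)
      else st) (acc, stack)).1 = acc ++ tiltRun rev items stack := by
  intro items
  induction items with
  | nil => intro acc stack; simp [tiltRun]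
  | cons item t ih =>
    intro acc stack
    simp only [List.foldl_cons, tiltRun]
    by_cases h1 : item.1 == "#"
    · have h2 : ¬ (item.1 == "O") = true := by
        simp_all
      simp only [h1, if_true, h2]
      rw [ih]; simp
    · simp only [h1]
      by_cases h2 : item.1 == "O"
      · simp only [h2, if_true]
        rw [ih]; simp
      · simp only [h2]
        exact ih acc stack

theorem extract_fwd (S C : List (List Int)) (v : Bool) (a : Int) : ∀ (ys : List Int) (stack : Int) (s : PySem.Set (List Int)),
    (tiltRun false (objsOf S C v a ys) stack).foldl
      (fun bs item => if item.1 == "O" then PySem.Set.add bs (mkP v a item.2) else bs) s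
    = (seqOf S C v 1 a ys stack).foldl (fun bs c => PySem.Set.add bs (mkP v a c)) s := by
  intro ys
  induction ys with
  | nil => intro stack s; simp [objsOf, tiltRun, seqOf]
  | cons y t ih =>
    intro stack s
    simp only [objsOf, List.filterMap_cons, seqOf]
    have e1 : (("O":String) == "#") = false := rfl
    have e2 : (("O":String) == "O") = true := rfl
    have e3 : (("#":String) == "#") = true := rfl
    have e4 : (("#":String) == "O") = false := rfl
    split_ifs with h1 h2
    · simp only [tiltRun, e1, e2, Bool.false_eq_true, Bool.not_false, if_false, if_true, List.foldl_cons]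
      exact ih (stack + 1) _
    · simp only [tiltRun, e3, e4, Bool.false_eq_true, if_false, if_true, List.foldl_cons]
      exact ih y s
    · exact ih stack s

theorem extract_rev (S C : List (List Int)) (v : Bool) (a : Int) : ∀ (ys : List Int) (stack : Int) (s : PySem.Set (List Int)),
    (tiltRun true (objsOf S C v a ys) stack).foldl
      (fun bs item => if item.1 == "O" then PySem.Set.add bs (mkP v a item.2) else bs) s
    = (seqOf S C v (-1) a ys stack).foldl (fun bs c => PySem.Set.add bs (mkP v a c)) s := by
  intro ys
  induction ys with
  | nil => intro stack s; simp [objsOf, tiltRun, seqOf]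
  | cons y t ih =>
    intro stack s
    simp only [objsOf, List.filterMap_cons, seqOf]
    have e1 : (("O":String) == "#") = false := rfl
    have e2 : (("O":String) == "O") = true := rfl
    have e3 : (("#":String) == "#") = true := rfl
    have e4 : (("#":String) == "O") = false := rfl
    split_ifs with h1 h2
    · simp only [tiltRun, e1, e2, Bool.false_eq_true, Bool.not_true, if_false, if_true, List.foldl_cons]
      rw [show stack - 1 = stack + -1 by ring]
      exact ih (stack + -1) _
    · simp only [tiltRun, e3, e4, Bool.false_eq_true, Bool.not_true, if_false, if_true, List.foldl_cons]
      exact ih y s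
    · exact ih stack s

theorem binner_eq (S C : List (List Int)) (v : Bool) (step a : Int) : ∀ (ys : List Int) (s : PySem.Set (List Int)) (stack : Int),
    (ys.foldl (fun (st : PySem.Set (List Int) × Int) b =>
        if S.contains (mkP v a b) then (PySem.Set.add st.1 (mkP v a (st.2 + step)), st.2 + step)
        else if C.contains (mkP v a b) then (st.1, b) else st) (s, stack)).1
    = (seqOf S C v step a ys stack).foldl (fun bs c => PySem.Set.add bs (mkP v a c)) s := by
  intro ys
  induction ys with
  | nil => intro s stack; simp [seqOf]
  | cons y t ih =>
    intro s stack
    simp only [List.foldl_cons, seqOf]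
    split_ifs with h1 h2
    · exact ih _ _
    · exact ih _ _
    · exact ih _ _

theorem fold_map_counter {β : Type} (g : Int → β) (F : List (List Int) → Int → β → List (List Int)) :
    ∀ (a b : Int) (s : List (List Int)),
    (((PySem.List.pyRange a b 1).map g).foldl (fun (st : List (List Int) × Int) sub =>
        (F st.1 st.2 sub, st.2 + 1)) (s, a)).1
    = (PySem.List.pyRange a b 1).foldl (fun s x => F s x (g x)) s := by
  intro a b
  induction hn : (b - a).toNat generalizing a with
  | zero =>
    intro s
    rw [PySem.List.pyRange_one_eq_nil (by omega)]
    simp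
  | succ n ih =>
    intro s
    rw [PySem.List.pyRange_one_cons (by omega)]
    simp only [List.map_cons, List.foldl_cons]
    rw [ih (a + 1) (by omega)]

theorem phase_fwd (S C : List (List Int)) (v : Bool) (ON IN : Int) :
    (((PySem.List.pyRange 0 ON 1).map (fun a =>
        tiltCol ((PySem.List.pyRange 0 IN 1).foldl (fun col y =>
          if S.contains (mkP v a y) then col ++ [("O", y)]
          else if C.contains (mkP v a y) then col ++ [("#", y)] else col) []) 0 false)).foldl
      (fun (st : List (List Int) × Int) sub =>
        (sub.foldl (fun bs item => if item.1 == "O" then PySem.Set.add bs (mkP v st.2 item.2) else bs) st.1, st.2 + 1))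
      (PySem.Set.empty, 0)).1
    = (PySem.List.pyRange 0 ON 1).foldl (fun new a =>
        ((PySem.List.pyRange 0 IN 1).foldl (fun (st : PySem.Set (List Int) × Int) b =>
          if S.contains (mkP v a b) then (PySem.Set.add st.1 (mkP v a (st.2 + 1)), st.2 + 1)
          else if C.contains (mkP v a b) then (st.1, b) else st) (new, -1)).1) PySem.Set.empty := by
  have hfm := fold_map_counter
    (g := fun a => tiltCol ((PySem.List.pyRange 0 IN 1).foldl (fun col y =>
        if S.contains (mkP v a y) then col ++ [("O", y)]
        else if C.contains (mkP v a y) then col ++ [("#", y)] else col) []) 0 false)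
    (F := fun bs a sub => sub.foldl
      (fun bs item => if item.1 == "O" then PySem.Set.add bs (mkP v a item.2) else bs) bs)
    0 ON PySem.Set.empty
  beta_reduce at hfm
  rw [hfm]
  congr 1
  funext new a
  rw [binner_eq]
  show (tiltCol _ 0 false).foldl _ new = _
  rw [scan_eq, List.nil_append]
  unfold tiltCol
  rw [sorted_objs_false S C v a _ (PySem.List.pairwise_lt_pyRange_one 0 IN)]
  rw [tilt_fold false (objsOf S C v a (PySem.List.pyRange 0 IN 1)) [] _, List.nil_append]
  show _ = (seqOf S C v 1 a _ (-1)).foldl _ new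
  rw [show ((0:Int) - 1) = -1 by ring] at *
  exact extract_fwd S C v a (PySem.List.pyRange 0 IN 1) (-1) new

theorem phase_rev (S C : List (List Int)) (v : Bool) (ON IN : Int) :
    (((PySem.List.pyRange 0 ON 1).map (fun a =>
        tiltCol ((PySem.List.pyRange 0 IN 1).foldl (fun col y =>
          if S.contains (mkP v a y) then col ++ [("O", y)]
          else if C.contains (mkP v a y) then col ++ [("#", y)] else col) []) IN true)).foldl
      (fun (st : List (List Int) × Int) sub =>
        (sub.foldl (fun bs item => if item.1 == "O" then PySem.Set.add bs (mkP v st.2 item.2) else bs) st.1, st.2 + 1))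
      (PySem.Set.empty, 0)).1
    = (PySem.List.pyRange 0 ON 1).foldl (fun new a =>
        ((PySem.List.pyRange (IN - 1) (-1) (-1)).foldl (fun (st : PySem.Set (List Int) × Int) b =>
          if S.contains (mkP v a b) then (PySem.Set.add st.1 (mkP v a (st.2 + -1)), st.2 + -1)
          else if C.contains (mkP v a b) then (st.1, b) else st) (new, IN)).1) PySem.Set.empty := by
  have hfm := fold_map_counter
    (g := fun a => tiltCol ((PySem.List.pyRange 0 IN 1).foldl (fun col y =>
        if S.contains (mkP v a y) then col ++ [("O", y)]
        else if C.contains (mkP v a y) then col ++ [("#", y)] else col) []) IN true)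
    (F := fun bs a sub => sub.foldl
      (fun bs item => if item.1 == "O" then PySem.Set.add bs (mkP v a item.2) else bs) bs)
    0 ON PySem.Set.empty
  beta_reduce at hfm
  rw [hfm]
  congr 1
  funext new a
  rw [binner_eq]
  show (tiltCol _ IN true).foldl _ new = _
  rw [scan_eq, List.nil_append]
  unfold tiltCol
  rw [sorted_objs_true S C v a _ (PySem.List.pairwise_lt_pyRange_one 0 IN)]
  rw [tilt_fold true _ [] _, List.nil_append]
  have hrg : (PySem.List.pyRange 0 IN 1).reverse = PySem.List.pyRange (IN - 1) (-1) (-1) := by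
    rw [PySem.List.pyRange_neg_one_eq_reverse]
    norm_num
  rw [hrg]
  exact extract_rev S C v a (PySem.List.pyRange (IN - 1) (-1) (-1)) IN new

-- ===== VERDICT (by name: the statement is the Claim_ definition above) =====
theorem phase1 (S C : List (List Int)) (shape : List Int) :
    getBallPositions ((getCols S C shape).map (fun col => tiltCol col 0 false)) "y"
    = tiltB (PySem.List.pyGetD shape 0 0) (PySem.List.pyGetD shape 1 0) S C true true := by
  have P := phase_fwd S C true (PySem.List.pyGetD shape 0 0) (PySem.List.pyGetD shape 1 0)
  simp only [mkP] at P
  unfold getBallPositions getCols tiltB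
  simp only [List.map_map,
    show (("y":String) == "y") = true from rfl, if_true]
  exact P

theorem phase2 (S C : List (List Int)) (shape : List Int) :
    getBallPositions ((getRows S C shape).map (fun row => tiltCol row 0 false)) "x"
    = tiltB (PySem.List.pyGetD shape 0 0) (PySem.List.pyGetD shape 1 0) S C false true := by
  have P := phase_fwd S C false (PySem.List.pyGetD shape 1 0) (PySem.List.pyGetD shape 0 0)
  simp only [mkP] at P
  unfold getBallPositions getRows tiltB
  simp only [List.map_map,
    show (("x":String) == "y") = false from rfl, show (("x":String) == "x") = true from rfl,
    if_true, Bool.false_eq_true, if_false]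
  exact P

theorem phase3 (S C : List (List Int)) (shape : List Int) :
    getBallPositions ((getCols S C shape).map (fun col => tiltCol col (PySem.List.pyGetD shape 1 0) true)) "y"
    = tiltB (PySem.List.pyGetD shape 0 0) (PySem.List.pyGetD shape 1 0) S C true false := by
  have P := phase_rev S C true (PySem.List.pyGetD shape 0 0) (PySem.List.pyGetD shape 1 0)
  simp only [mkP] at P
  unfold getBallPositions getCols tiltB
  simp only [List.map_map,
    show (("y":String) == "y") = true from rfl, if_true]
  exact P

theorem phase4 (S C : List (List Int)) (shape : List Int) :
    getBallPositions ((getRows S C shape).map (fun row => tiltCol row (PySem.List.pyGetD shape 0 0) true)) "x"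
    = tiltB (PySem.List.pyGetD shape 0 0) (PySem.List.pyGetD shape 1 0) S C false false := by
  have P := phase_rev S C false (PySem.List.pyGetD shape 1 0) (PySem.List.pyGetD shape 0 0)
  simp only [mkP] at P
  unfold getBallPositions getRows tiltB
  simp only [List.map_map,
    show (("x":String) == "y") = false from rfl, show (("x":String) == "x") = true from rfl,
    if_true, Bool.false_eq_true, if_false]
  exact P

theorem spin_spec : Claim_equal_spin := by
  intro shape balls cubes _ hpre
  unfold Spec_spin spin spin_alt
  simp only [phase1, phase2, phase3, phase4]
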